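-- pv_equiv track=rewrite | github.com/fat-forensics/fat-forensics | fatf/accountability/data/testing.py | generalize_string
-- ===== SOURCE A (Python) =====
-- def generalize_string(x):
--     """
--         Generalizes the last element of a string to '*'.
--     """
--     x = list(str(x))
--     for idx, item in enumerate(x[::-1]):
--         if item == '*':
--             continue
--         else:
--             x[-(idx+1)] = '*'
--             break
--     return "".join(x)
-- ===== SOURCE B (Python) =====
-- def generalize_string(x):
--     s = str(x)
--     stripped = s.rstrip('*')
--     if not stripped:
--         return s
--     return stripped[:-1] + '*' + s[len(stripped):]
-- ===== Notes on version B (the rewrite author's own statement) =====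
-- stated objective: simpler
-- what changed: Replaces the reversed enumerate loop with per-char branching and in-place list assignment by a library right-strip of the trailing star run plus slice concatenation.
import Mathlib
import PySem

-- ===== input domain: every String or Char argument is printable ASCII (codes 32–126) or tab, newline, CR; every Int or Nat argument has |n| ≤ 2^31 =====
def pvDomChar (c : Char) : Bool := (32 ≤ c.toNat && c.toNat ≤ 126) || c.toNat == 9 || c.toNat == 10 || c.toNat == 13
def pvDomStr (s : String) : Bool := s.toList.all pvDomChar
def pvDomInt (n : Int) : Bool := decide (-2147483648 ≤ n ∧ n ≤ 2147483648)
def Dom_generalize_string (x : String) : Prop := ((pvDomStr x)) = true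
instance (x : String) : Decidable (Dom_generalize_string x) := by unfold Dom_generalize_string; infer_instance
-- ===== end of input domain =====

-- B replaces A's reversed scan-and-mutate loop by a library right-strip of the trailing star run plus slice concatenation (objective: simpler).

-- ===== PORT A =====
-- the for-loop over enumerate(x[::-1]): carries the running index idx; on '*' continue,
-- otherwise assign x[-(idx+1)] = '*' (always in range here: idx < len x) and break.
def generalize_string_loop (l : List Char) : List Char → Nat → List Char
  | [], _ => l
  | item :: rest, idx =>
      if item = '*' then generalize_string_loop l rest (idx + 1)
      else l.set (l.length - (idx + 1)) '*'

def generalize_string (x : String) : String :=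
  let l := x.toList
  String.mk (generalize_string_loop l l.reverse 0)

-- ===== PORT B =====
-- s.rstrip('*') = drop the trailing run of '*' (reverse/dropWhile/reverse); then
-- stripped[:-1] + '*' + s[len(stripped):] via dropLast / drop.
def generalize_string_alt (x : String) : String :=
  let s := x.toList
  let stripped := (s.reverse.dropWhile (· = '*')).reverse
  if stripped = [] then String.mk s
  else String.mk (stripped.dropLast ++ '*' :: s.drop stripped.length)

-- ===== PRECONDITION & SPEC =====
def Spec_generalize_string (x : String) (out : String) : Prop := out = generalize_string_alt x
instance (x : String) (out : String) : Decidable (Spec_generalize_string x out) := by unfold Spec_generalize_string; infer_instance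

-- ===== CLAIM (what is proved, stated in full; the proofs are below) =====
def Claim_equal_generalize_string : Prop := ∀ (x : String), Dom_generalize_string x → Spec_generalize_string x (generalize_string x)

-- ===== LEMMAS AND PROOFS =====

-- reference form on the reversed list: skip the leading run of '*', replace the next char
def repFront : List Char → List Char
  | [] => []
  | c :: cs => if c = '*' then c :: repFront cs else '*' :: cs

theorem set_len_append {α : Type} (p : List α) (a : α) (q : List α) (b : α) :
    (p ++ a :: q).set p.length b = p ++ b :: q := by
  induction p with
  | nil => rfl
  | cons x xs ih => simp [List.set, ih]

theorem drop_len_append {α : Type} (p q : List α) :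
    (p ++ q).drop p.length = q := by
  induction p with
  | nil => rfl
  | cons x xs ih => simpa using ih

theorem generalize_string_loop_eq (m : List Char) :
    ∀ (k : Nat) (l : List Char), l.reverse = List.replicate k '*' ++ m →
      generalize_string_loop l m k = (List.replicate k '*' ++ repFront m).reverse := by
  induction m with
  | nil =>
      intro k l h
      simp [generalize_string_loop, repFront, ← h]
  | cons c cs ih =>
      intro k l h
      by_cases hc : c = '*'
      · subst hc
        have h' : l.reverse = List.replicate (k + 1) '*' ++ cs := by
          rw [h, List.replicate_succ']; simp
        simpa [generalize_string_loop, repFront, List.replicate_succ', List.append_assoc]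
          using ih (k + 1) l h'
      · have hl : l = cs.reverse ++ c :: List.replicate k '*' := by
          have := congrArg List.reverse h
          simpa using this
        have hlen : l.length = cs.length + 1 + k := by
          rw [hl]; simp; omega
        have hidx : l.length - (k + 1) = cs.reverse.length := by simp; omega
        rw [generalize_string_loop]
        simp only [hc, if_false]
        rw [hidx, hl, set_len_append]
        simp [repFront, hc]

theorem repFront_of_dropWhile_nil (m : List Char) (h : m.dropWhile (fun x => decide (x = '*')) = []) :
    repFront m = m := by
  induction m with
  | nil => rfl
  | cons c cs ih =>
      rw [List.dropWhile_cons] at h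
      by_cases hc : c = '*'
      · simp only [hc, decide_true, if_true] at h
        simp [repFront, hc, ih h]
      · simp [hc] at h

theorem repFront_replicate_append (t : Nat) (c : Char) (cs : List Char) (hc : c ≠ '*') :
    repFront (List.replicate t '*' ++ c :: cs) = List.replicate t '*' ++ '*' :: cs := by
  induction t with
  | zero => simp [repFront, hc]
  | succ n ih => simp [List.replicate_succ, repFront, ih]

theorem dropWhile_head_false {α : Type} (p : α → Bool) (m : List α) (c : α) (cs : List α)
    (h : m.dropWhile p = c :: cs) : p c = false := by
  induction m with
  | nil => simp at h
  | cons x xs ih =>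
      rw [List.dropWhile_cons] at h
      by_cases hx : p x = true
      · simp only [hx, if_true] at h; exact ih h
      · simp only [hx, if_false] at h
        cases h
        simpa using hx

-- B's list-level body equals the reference form
theorem alt_list_eq (m : List Char) :
    (if (m.dropWhile (fun x => decide (x = '*'))).reverse = [] then m.reverse
     else (m.dropWhile (fun x => decide (x = '*'))).reverse.dropLast ++
          '*' :: m.reverse.drop (m.dropWhile (fun x => decide (x = '*'))).reverse.length)
    = (repFront m).reverse := by
  rcases hdw : m.dropWhile (fun x => decide (x = '*')) with _ | ⟨c, cs⟩
  · rw [repFront_of_dropWhile_nil m hdw]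
    simp
  · have hc : ¬ (c = '*') := by
      have := dropWhile_head_false _ m c cs hdw
      simpa using this
    have htw : m.takeWhile (fun x => decide (x = '*')) =
        List.replicate (m.takeWhile (fun x => decide (x = '*'))).length '*' := by
      apply List.eq_replicate_of_mem
      intro b hb
      have := List.mem_takeWhile_imp hb
      simpa using this
    set t := (m.takeWhile (fun x => decide (x = '*'))).length with ht
    have hmsplit : m = List.replicate t '*' ++ c :: cs := by
      conv_lhs => rw [← List.takeWhile_append_dropWhile (p := fun x => decide (x = '*')) (l := m)]
      rw [hdw, ← htw]
    have hne : (c :: cs).reverse ≠ [] := by simp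
    simp only [if_neg hne]
    conv_rhs => rw [hmsplit, repFront_replicate_append t c cs hc]
    have hmr : m.reverse = cs.reverse ++ c :: List.replicate t '*' := by
      rw [hmsplit]; simp
    have hdl : (c :: cs).reverse.dropLast = cs.reverse := by
      simp
    have hsplit2 : cs.reverse ++ c :: List.replicate t '*'
        = (cs.reverse ++ [c]) ++ List.replicate t '*' := by simp
    have hlen2 : (c :: cs).reverse.length = (cs.reverse ++ [c]).length := by simp
    rw [hmr, hdl, hsplit2, hlen2, drop_len_append]
    simp

-- ===== VERDICT (by name: the statement is the Claim_ definition above) =====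
theorem generalize_string_spec : Claim_equal_generalize_string := by
  intro x _
  unfold Spec_generalize_string generalize_string generalize_string_alt
  obtain ⟨m, hm⟩ : ∃ m : List Char, x.toList = m.reverse := ⟨x.toList.reverse, by simp⟩
  rw [hm]
  simp only [List.reverse_reverse]
  have hloop : generalize_string_loop m.reverse m 0 = (repFront m).reverse := by
    have := generalize_string_loop_eq m 0 m.reverse (by simp)
    simpa using this
  rw [hloop, ← apply_ite String.mk, alt_list_eq]
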